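-- pv_equiv track=rewrite | github.com/mukerem/ICPC-Journey | ICPC WF 2021 Dhaka Practice /kattis_hexagonal_rooks.py | move3
-- ===== SOURCE A (Python) =====
-- def good(a, b):
--     if a < 1 or a > 11 or b < 1 or b > 11:
--         return False
--     a = abs(a-6)
--     if a + b > 11:
--         return False
--     return True
--
-- def move3(a, b):
--     c = []
--     u, v = -1, 1
--     while 1:
--         if a <= 6:
--             v = 0
--         a += u
--         b += v
--         if not good(a, b):
--             break
--         c.append((a, b))
--     return c
-- ===== SOURCE B (Python) =====
-- def good(a, b):
--     if a < 1 or a > 11 or b < 1 or b > 11: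
--         return False
--     a = abs(a-6)
--     if a + b > 11:
--         return False
--     return True
--
-- def move3(a, b):
--     # Staged, loop-free construction: the rook can visit at most the 11 cells
--     # (a-i, b+min(i,d)) for i = 1..11 (d = number of diagonal steps), so build
--     # that candidate list once, locate the first invalid cell, and return the
--     # prefix before it.
--     d = max(a - 6, 0)
--     candidates = [(a - i, b + min(i, d)) for i in range(1, 12)]
--     n = next((i for i, p in enumerate(candidates) if not good(*p)), len(candidates))
--     return candidates[:n]
-- ===== Notes on version B (the rewrite author's own statement) =====
-- stated objective: alternative
-- what changed: Replaces A's stateful while-loop (mutable position, a direction flag switched off mid-loop, break) by a loop-free staged construction: build the bounded candidate list [(a-i, b+min(i,d)) for i in 1..11] once, locate the first invalid cell with next/enumerate, and return the slice before it.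
import Mathlib
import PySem

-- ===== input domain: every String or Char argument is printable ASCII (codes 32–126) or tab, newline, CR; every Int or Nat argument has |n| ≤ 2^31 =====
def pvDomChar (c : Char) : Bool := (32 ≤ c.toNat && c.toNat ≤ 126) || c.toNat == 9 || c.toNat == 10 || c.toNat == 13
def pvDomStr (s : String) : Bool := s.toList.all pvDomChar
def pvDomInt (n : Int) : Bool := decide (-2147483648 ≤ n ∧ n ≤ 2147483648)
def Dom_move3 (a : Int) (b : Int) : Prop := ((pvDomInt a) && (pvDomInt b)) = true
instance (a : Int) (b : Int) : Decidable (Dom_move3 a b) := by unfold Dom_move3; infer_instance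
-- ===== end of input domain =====

-- B replaces A's mutating while-loop (direction flag v, break) by a staged, loop-free
-- construction: build the ≤11 candidate cells once, find the first invalid one, slice
-- the prefix before it; objective: alternative.


-- ===== PORT A =====
-- exact port of 'good' (shared helper of Source A, used verbatim by Source B too)
def goodA (a : Int) (b : Int) : Bool :=
  if a < 1 || a > 11 || b < 1 || b > 11 then false
  else if |a - 6| + b > 11 then false
  else true

-- the while-loop of A; fuel bounds the iterations (the loop stops once a < 1, so
-- a.toNat + 1 fuel is always enough; the fuel-0 branch is unreachable)
def move3Aux : Nat → Int → Int → Int → List (Int × Int)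
  | 0, _, _, _ => []
  | f + 1, a, b, v =>
    let v' := if a ≤ 6 then 0 else v
    let a' := a + (-1)
    let b' := b + v'
    if !goodA a' b' then [] else (a', b') :: move3Aux f a' b' v'

def move3 (a : Int) (b : Int) : List (Int × Int) :=
  move3Aux (a.toNat + 1) a b 1

-- ===== PORT B =====
-- Source B: candidate list comprehension, then 'next' over enumerate finds the first
-- invalid index (defaulting to the length), then the slice candidates[:n]
def move3_alt (a : Int) (b : Int) : List (Int × Int) :=
  let d := max (a - 6) 0
  let candidates := (PySem.List.pyRange 1 12 1).map (fun i => (a - i, b + min i d))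
  let n : Nat :=
    match candidates.findIdx? (fun p => !goodA p.1 p.2) with
    | some i => i
    | none => candidates.length
  candidates.take n

-- ===== PRECONDITION & SPEC =====
def Spec_move3 (a : Int) (b : Int) (out : List (Int × Int)) : Prop := out = move3_alt a b
instance (a : Int) (b : Int) (out : List (Int × Int)) : Decidable (Spec_move3 a b out) := by unfold Spec_move3; infer_instance

-- ===== CLAIM (what is proved, stated in full; the proofs are below) =====
def Claim_equal_move3 : Prop := ∀ (a : Int) (b : Int), Dom_move3 a b → Spec_move3 a b (move3 a b)

-- ===== LEMMAS AND PROOFS =====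

theorem goodA_bounds (a b : Int) (h : goodA a b = true) : 1 ≤ a ∧ a ≤ 11 := by
  unfold goodA at h
  by_cases h1 : (a < 1 || a > 11 || b < 1 || b > 11) = true
  · simp [h1] at h
  · simp only [Bool.or_eq_true, decide_eq_true_eq, not_or] at h1
    omega

-- B's 'first bad index then slice' equals takeWhile good
theorem take_findIdx_eq_takeWhile (l : List (Int × Int)) :
    l.take (match l.findIdx? (fun p => !goodA p.1 p.2) with
            | some i => i | none => l.length)
      = l.takeWhile (fun p => goodA p.1 p.2) := by
  induction l with
  | nil => simp
  | cons x xs ih =>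
    by_cases hx : goodA x.1 x.2 = true
    · rw [List.findIdx?_cons]
      simp only [hx, Bool.not_true, if_neg (by simp : ¬ (false = true)),
        List.takeWhile_cons]
      cases hfi : xs.findIdx? (fun p => !goodA p.1 p.2) with
      | none =>
        rw [hfi] at ih
        simp only [Option.map_none]
        simpa using congrArg (List.cons x) ih
      | some i =>
        rw [hfi] at ih
        simp only [Option.map_some]
        simpa using congrArg (List.cons x) ih
    · rw [List.findIdx?_cons]
      simp only [Bool.not_eq_true] at hx
      simp [hx]

-- main loop correspondence: A's loop entered at counter value i (state
-- (a-(i-1), b+min(i-1)d, v)) produces exactly the good prefix of the remaining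
-- candidate cells (a-j, b+min(j)d) for j = i .. 11
theorem main_lemma (a b : Int) (f : Nat) :
    ∀ (i v : Int), 1 ≤ i → i ≤ 12 → (a - (i - 1)).toNat < f →
    (i - 1 < max (a-6) 0 → v = 1) →
    (i = 1 ∨ goodA (a - (i-1)) (b + min (i-1) (max (a-6) 0)) = true) →
    (2 ≤ i → goodA (a - 1) (b + min 1 (max (a-6) 0)) = true) →
    move3Aux f (a - (i-1)) (b + min (i-1) (max (a-6) 0)) v
      = ((PySem.List.pyRange i 12 1).map (fun j => (a - j, b + min j (max (a-6) 0)))).takeWhile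
          (fun p => goodA p.1 p.2) := by
  induction f with
  | zero => intro i v hi hi12 hf hv hprev hfirst; omega
  | succ f ih =>
    intro i v hi hi12 hf hv hprev hfirst
    have hveq : (if a - (i-1) ≤ 6 then 0 else v)
        = min i (max (a-6) 0) - min (i-1) (max (a-6) 0) := by
      by_cases hc : i - 1 < max (a-6) 0
      · have hv1 := hv hc
        have hn : ¬ (a - (i-1) ≤ 6) := by omega
        rw [if_neg hn, hv1]; omega
      · have hy : a - (i-1) ≤ 6 := by omega
        rw [if_pos hy]; omega
    show (if !goodA (a - (i-1) + (-1)) (b + min (i-1) (max (a-6) 0) + (if a - (i-1) ≤ 6 then 0 else v)) then []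
          else (a - (i-1) + (-1), b + min (i-1) (max (a-6) 0) + (if a - (i-1) ≤ 6 then 0 else v))
               :: move3Aux f (a - (i-1) + (-1)) (b + min (i-1) (max (a-6) 0) + (if a - (i-1) ≤ 6 then 0 else v)) (if a - (i-1) ≤ 6 then 0 else v)) = _
    rw [hveq]
    have ha' : a - (i-1) + (-1) = a - i := by ring
    have hb' : b + min (i-1) (max (a-6) 0) + (min i (max (a-6) 0) - min (i-1) (max (a-6) 0)) = b + min i (max (a-6) 0) := by ring
    rw [ha', hb']
    by_cases h12 : i = 12
    · -- candidate list exhausted: previous cells force a ≤ 12, so step 12 is bad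
      subst h12
      have hfst := hfirst (by omega)
      have hb1 := goodA_bounds _ _ hfst
      have hbad : goodA (a - 12) (b + min 12 (max (a-6) 0)) = false := by
        cases hg : goodA (a - 12) (b + min 12 (max (a-6) 0)) with
        | false => rfl
        | true => have := goodA_bounds _ _ hg; omega
      rw [PySem.List.pyRange_one_eq_nil (by omega)]
      simp [hbad]
    · have hlt : (i : Int) < 12 := by omega
      rw [PySem.List.pyRange_one_cons hlt]
      cases hg : goodA (a - i) (b + min i (max (a-6) 0)) with
      | false => simp [hg]
      | true =>
        have hbnd := goodA_bounds _ _ hg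
        have hfst' : 2 ≤ i + 1 → goodA (a - 1) (b + min 1 (max (a-6) 0)) = true := by
          intro _
          by_cases h1 : i = 1
          · simpa [h1] using hg
          · exact hfirst (by omega)
        have ihh := ih (i+1) (min i (max (a-6) 0) - min (i-1) (max (a-6) 0))
          (by omega) (by omega) (by omega) (by omega)
          (Or.inr (by have h : (i + 1 - 1 : Int) = i := by ring
                      rw [h]; exact hg)) hfst'
        have heq2 : (i + 1 - 1 : Int) = i := by ring
        rw [heq2] at ihh
        simp only [List.map_cons, List.takeWhile_cons, hg]
        simp [ihh]

-- ===== VERDICT (by name: the statement is the Claim_ definition above) =====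
theorem move3_spec : Claim_equal_move3 := by
  intro a b _
  unfold Spec_move3 move3 move3_alt
  rw [take_findIdx_eq_takeWhile]
  have h := main_lemma a b (a.toNat + 1) 1 1 (by omega) (by omega) (by omega)
    (by omega) (Or.inl rfl) (by omega)
  simpa using h
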